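-- pv_equiv track=rewrite | github.com/pypi-data/pypi-mirror-182 | packages/premium/premium-0.0.10-py3-none-any.whl/premium/preprocessing/ner.py | extract_bio
-- ===== SOURCE A (Python) =====
-- from typing import List, Union, Callable, Set, Dict, Tuple, Optional
--
-- def extract_bio(text: str) -> List[str]:
--     """ Get NER BIO sequence from text
--     """
--     text = text.strip()
--     if not text:
--         return []
--     bio = []
--     amid = False
--     for c in text:
--         if c == '[':
--             amid = True
--         elif c == ']':
--             amid = False
--         else:
--             if amid:
--                 bio.append('B' if bio and bio[-1] == 'O' else 'I')
--             else:
--                 bio.append('O')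
--     return bio
-- ===== SOURCE B (Python) =====
-- def extract_bio(text):
--     text = text.strip()
--     if not text:
--         return []
--     # pass 1: one inside? flag per emitted tag
--     flags = []
--     inside = False
--     for c in text:
--         if c == '[':
--             inside = True
--         elif c == ']':
--             inside = False
--         else:
--             flags.append(inside)
--     # pass 2: emit tags from flags, tracking previously emitted tag
--     tags = []
--     prev = None
--     for f in flags:
--         tag = ('B' if prev == 'O' else 'I') if f else 'O'
--         tags.append(tag)
--         prev = tag
--     return tags
-- ===== Notes on version B (the rewrite author's own statement) =====
-- stated objective: alternative
-- what changed: Two-pass decomposition: first pass converts the bracketed text to a per-character inside/outside flag list, second pass turns flags into tags using a prev-tag variable instead of inspecting the growing output list's last element.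
import Mathlib
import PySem

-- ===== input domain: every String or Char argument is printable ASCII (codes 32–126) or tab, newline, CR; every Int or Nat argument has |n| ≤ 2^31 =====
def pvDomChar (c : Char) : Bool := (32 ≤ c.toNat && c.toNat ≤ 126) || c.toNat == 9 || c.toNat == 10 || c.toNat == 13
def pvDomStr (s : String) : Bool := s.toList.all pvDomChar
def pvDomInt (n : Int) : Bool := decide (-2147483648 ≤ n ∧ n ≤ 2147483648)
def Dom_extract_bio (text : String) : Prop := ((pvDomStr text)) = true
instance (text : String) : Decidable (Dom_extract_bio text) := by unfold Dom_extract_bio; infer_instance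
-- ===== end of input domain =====

-- B replaces A's single pass that inspects the output list's last element with a two-pass
-- decomposition (flags list, then prev-tag emission); objective: alternative decomposition.


-- ===== PORT A =====
def extract_bio (text : String) : List String :=
  let t := PySem.Str.strip text
  if t = "" then []
  else
    (t.toList.foldl
      (fun (st : List String × Bool) c =>
        if c = '[' then (st.1, true)
        else if c = ']' then (st.1, false)
        else if st.2 then
          (st.1 ++ [if st.1 ≠ [] ∧ st.1.getLast? = some "O" then "B" else "I"], st.2)
        else (st.1 ++ ["O"], st.2))
      ([], false)).1

-- ===== PORT B =====
def extract_bio_alt (text : String) : List String :=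
  let t := PySem.Str.strip text
  if t = "" then []
  else
    let flags :=
      (t.toList.foldl
        (fun (st : List Bool × Bool) c =>
          if c = '[' then (st.1, true)
          else if c = ']' then (st.1, false)
          else (st.1 ++ [st.2], st.2))
        ([], false)).1
    (flags.foldl
      (fun (st : List String × Option String) f =>
        let tag := if f then (if st.2 = some "O" then "B" else "I") else "O"
        (st.1 ++ [tag], some tag))
      ([], none)).1

-- ===== PRECONDITION & SPEC =====
def Spec_extract_bio (text : String) (out : List String) : Prop := out = extract_bio_alt text
instance (text : String) (out : List String) : Decidable (Spec_extract_bio text out) := by unfold Spec_extract_bio; infer_instance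

-- ===== CLAIM (what is proved, stated in full; the proofs are below) =====
def Claim_equal_extract_bio : Prop := ∀ (text : String), Dom_extract_bio text → Spec_extract_bio text (extract_bio text)

-- ===== LEMMAS AND PROOFS =====

/-- Reference tag stream: tags emitted for `cs` given the inside flag and last emitted tag. -/
def pvTags : List Char → Bool → Option String → List String
  | [], _, _ => []
  | c :: cs, amid, prev =>
    if c = '[' then pvTags cs true prev
    else if c = ']' then pvTags cs false prev
    else if amid then
      let t := if prev = some "O" then "B" else "I"
      t :: pvTags cs amid (some t)
    else "O" :: pvTags cs amid (some "O")

/-- Flags produced by B's first pass for `cs` given the inside flag. -/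
def pvFlags : List Char → Bool → List Bool
  | [], _ => []
  | c :: cs, amid =>
    if c = '[' then pvFlags cs true
    else if c = ']' then pvFlags cs false
    else amid :: pvFlags cs amid

/-- Tags produced by B's second pass for a flag list given the last emitted tag. -/
def pvBTags : List Bool → Option String → List String
  | [], _ => []
  | f :: fs, prev =>
    let t := if f then (if prev = some "O" then "B" else "I") else "O"
    t :: pvBTags fs (some t)

theorem pvA_fold (cs : List Char) (bio : List String) (amid : Bool) :
    (cs.foldl
      (fun (st : List String × Bool) c =>
        if c = '[' then (st.1, true)
        else if c = ']' then (st.1, false)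
        else if st.2 then
          (st.1 ++ [if st.1 ≠ [] ∧ st.1.getLast? = some "O" then "B" else "I"], st.2)
        else (st.1 ++ ["O"], st.2))
      (bio, amid)).1 = bio ++ pvTags cs amid bio.getLast? := by
  induction cs generalizing bio amid with
  | nil => simp [pvTags]
  | cons c cs ih =>
    simp only [List.foldl, pvTags]
    by_cases h1 : c = '[' <;> by_cases h2 : c = ']' <;>
      simp [h1, h2, ih]
    · cases amid with
      | false => simp [ih, List.getLast?_append]
      | true =>
        by_cases hO : bio.getLast? = some "O"
        · have hne : bio ≠ [] := by intro hn; simp [hn] at hO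
          simp [ih, hne, List.getLast?_append]
        · have hc : ¬(bio ≠ [] ∧ bio.getLast? = some "O") := fun h => hO h.2
          simp [ih, hO, List.getLast?_append]

theorem pvB1_fold (cs : List Char) (fl : List Bool) (amid : Bool) :
    (cs.foldl
      (fun (st : List Bool × Bool) c =>
        if c = '[' then (st.1, true)
        else if c = ']' then (st.1, false)
        else (st.1 ++ [st.2], st.2))
      (fl, amid)).1 = fl ++ pvFlags cs amid := by
  induction cs generalizing fl amid with
  | nil => simp [pvFlags]
  | cons c cs ih =>
    simp only [List.foldl, pvFlags]
    by_cases h1 : c = '[' <;> by_cases h2 : c = ']' <;> simp [h1, h2, ih]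

theorem pvB2_fold (fs : List Bool) (out : List String) (prev : Option String) :
    (fs.foldl
      (fun (st : List String × Option String) f =>
        let tag := if f then (if st.2 = some "O" then "B" else "I") else "O"
        (st.1 ++ [tag], some tag))
      (out, prev)).1 = out ++ pvBTags fs prev := by
  induction fs generalizing out prev with
  | nil => simp [pvBTags]
  | cons f fs ih =>
    simp only [List.foldl, pvBTags]
    cases f <;> simp [ih]

theorem pvBridge (cs : List Char) (amid : Bool) (prev : Option String) :
    pvBTags (pvFlags cs amid) prev = pvTags cs amid prev := by
  induction cs generalizing amid prev with
  | nil => simp [pvFlags, pvTags, pvBTags]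
  | cons c cs ih =>
    simp only [pvFlags, pvTags]
    by_cases h1 : c = '[' <;> by_cases h2 : c = ']' <;> simp [h1, h2, ih]
    cases amid <;> by_cases hO : prev = some "O" <;> simp [pvBTags, hO, ih]

-- ===== VERDICT (by name: the statement is the Claim_ definition above) =====
theorem extract_bio_spec : Claim_equal_extract_bio := by
  intro text _
  unfold Spec_extract_bio extract_bio extract_bio_alt
  by_cases h : PySem.Str.strip text = ""
  · simp [h]
  · simp only [if_neg h]
    rw [pvA_fold, pvB1_fold, pvB2_fold]
    simp [pvBridge]
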